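-- pv_equiv track=rewrite | github.com/ukarthikeycs23/1WA23CS024_AI_LAB | forwardchaining.py | match_premises_to_facts
-- ===== SOURCE A (Python) =====
-- def is_var(x): return isinstance(x, str) and x and x[0].islower()
--
-- def apply_subst_term(t, subst):
--     return subst.get(t, t)
--
-- def unify_terms(t1, t2, subst):
--     # apply current substitution
--     t1 = apply_subst_term(t1, subst)
--     t2 = apply_subst_term(t2, subst)
--     if t1 == t2:
--         return subst
--     if is_var(t1):
--         new = dict(subst); new[t1] = t2; return new
--     if is_var(t2):
--         new = dict(subst); new[t2] = t1; return new
--     return None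
--
-- def unify_atoms(a, b, subst=None):
--     """Unify atom a with atom b (same predicate), return substitution or None."""
--     if subst is None: subst = {}
--     p1, args1 = a; p2, args2 = b
--     if p1 != p2 or len(args1) != len(args2):
--         return None
--     s = dict(subst)
--     for x,y in zip(args1, args2):
--         s = unify_terms(x, y, s)
--         if s is None: return None
--     return s
--
-- def match_premises_to_facts(premises, facts):
--     """
--     Try to find substitutions that make all premises true w.r.t facts.
--     Returns list of substitutions (possibly multiple matches).
--     """
--     # For each premise, find facts with same predicate and try unify.
--     # We perform a simple backtracking to combine substitutions consistently.
--     matches = []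
--
--     def backtrack(i, current_subst):
--         if i == len(premises):
--             matches.append(dict(current_subst))
--             return
--         prem = premises[i]
--         for f in facts_by_pred.get(prem[0], []):
--             s = unify_atoms(prem, f, dict(current_subst))
--             if s is not None:
--                 backtrack(i+1, s)
--
--     # index facts by predicate for speed
--     facts_by_pred = {}
--     for f in facts:
--         facts_by_pred.setdefault(f[0], []).append(f)
--
--     backtrack(0, {})
--     return matches
-- ===== SOURCE B (Python) =====
-- def match_premises_to_facts(premises, facts):
--     """Index-free recursive search over plain association lists: no predicate
--     index and no dict copies; substitutions are built as lists of pairs and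
--     turned into dicts only at the leaves."""
--     def lookup(s, t):
--         for k, v in s:
--             if k == t:
--                 return v
--         return t
--
--     def var(t):
--         return bool(t) and t[0].islower()
--
--     def bind(s, k, v):
--         for i, (k2, _) in enumerate(s):
--             if k2 == k:
--                 return s[:i] + [(k, v)] + s[i + 1:]
--         return s + [(k, v)]
--
--     def unify_args(xs, ys, s):
--         if not xs or not ys:
--             return s
--         a, b = lookup(s, xs[0]), lookup(s, ys[0])
--         if a == b:
--             return unify_args(xs[1:], ys[1:], s)
--         if var(a):
--             return unify_args(xs[1:], ys[1:], bind(s, a, b))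
--         if var(b):
--             return unify_args(xs[1:], ys[1:], bind(s, b, a))
--         return None
--
--     def solve(ps, s):
--         if not ps:
--             return [dict(s)]
--         name, args = ps[0]
--         return [r
--                 for f in facts
--                 if f[0] == name and len(f[1]) == len(args)
--                 for s2 in [unify_args(args, f[1], s)]
--                 if s2 is not None
--                 for r in solve(ps[1:], s2)]
--
--     return solve(premises, [])
-- ===== Notes on version B (the rewrite author's own statement) =====
-- stated objective: alternative
-- what changed: Replaces the dict-based recursive backtracking with a predicate index by an index-free recursive search that scans the fact list directly per premise and threads substitutions as plain association lists (first-match lookup, replace-or-append binding), converting to dicts only at the leaves.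
import Mathlib
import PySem

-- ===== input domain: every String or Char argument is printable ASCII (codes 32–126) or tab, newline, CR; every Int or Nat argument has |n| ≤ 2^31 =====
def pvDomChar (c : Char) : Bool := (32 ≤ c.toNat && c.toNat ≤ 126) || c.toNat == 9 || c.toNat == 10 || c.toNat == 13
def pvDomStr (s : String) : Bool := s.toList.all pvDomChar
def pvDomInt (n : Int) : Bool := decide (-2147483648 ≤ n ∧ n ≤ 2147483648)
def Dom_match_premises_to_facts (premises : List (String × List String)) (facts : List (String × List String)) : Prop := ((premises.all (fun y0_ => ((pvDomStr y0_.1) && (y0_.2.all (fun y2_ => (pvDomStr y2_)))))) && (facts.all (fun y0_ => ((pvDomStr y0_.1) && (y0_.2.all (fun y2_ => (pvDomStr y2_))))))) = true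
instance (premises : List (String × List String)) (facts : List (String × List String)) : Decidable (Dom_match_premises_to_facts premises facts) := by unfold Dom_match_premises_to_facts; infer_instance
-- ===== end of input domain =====

-- B drops A's predicate index and dict-based substitutions: it scans the fact list directly per
-- premise and threads substitutions as plain association lists, building dicts only at the leaves.

-- ===== PORT A =====
-- is_var(x): nonempty string whose first char is lowercase (ASCII on Dom; exact there)
def pyIsVar (x : String) : Bool :=
  match x.toList with
  | [] => false
  | c :: _ => c.isLower

-- subst.get(t, t)
def applySubstTerm (t : String) (subst : PySem.Dict String String) : String :=
  subst.getD t t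

def unifyTerms (t1 t2 : String) (subst : PySem.Dict String String) :
    Option (PySem.Dict String String) :=
  let t1 := applySubstTerm t1 subst
  let t2 := applySubstTerm t2 subst
  if t1 == t2 then some subst
  else if pyIsVar t1 then some (subst.insert t1 t2)
  else if pyIsVar t2 then some (subst.insert t2 t1)
  else none

-- the 'for x,y in zip(args1, args2)' loop of unify_atoms
def unifyLoop : List (String × String) → PySem.Dict String String → Option (PySem.Dict String String)
  | [], s => some s
  | (x, y) :: rest, s =>
    match unifyTerms x y s with
    | some s' => unifyLoop rest s'
    | none => none

def unifyAtoms (a b : String × List String) (subst : PySem.Dict String String) :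
    Option (PySem.Dict String String) :=
  if a.1 != b.1 || a.2.length != b.2.length then none
  else unifyLoop (a.2.zip b.2) subst

-- facts_by_pred: setdefault(f[0], []).append(f)
def factsByPred (facts : List (String × List String)) :
    PySem.Dict String (List (String × List String)) :=
  facts.foldl (fun d f => d.insert f.1 (d.getD f.1 [] ++ [f])) PySem.Dict.empty

-- the recursive backtrack(i, current_subst); matches are returned instead of appended to a mutable list
def backtrackA (fbp : PySem.Dict String (List (String × List String))) :
    List (String × List String) → PySem.Dict String String → List (PySem.Dict String String)
  | [], s => [s]
  | p :: rest, s =>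
    (fbp.getD p.1 []).foldl
      (fun acc f =>
        match unifyAtoms p f s with
        | some s' => acc ++ backtrackA fbp rest s'
        | none => acc) []

def match_premises_to_facts (premises : List (String × List String))
    (facts : List (String × List String)) : List (List (String × String)) :=
  (backtrackA (factsByPred facts) premises PySem.Dict.empty).map (·.items)

-- ===== PORT B =====
-- first-match lookup in a plain association list, term itself as default
def lookupB : List (String × String) → String → String
  | [], t => t
  | (k, v) :: rest, t => if k == t then v else lookupB rest t

-- var(t): nonempty and first char lowercase ('A' default makes the empty string non-var)
def varB (t : String) : Bool := (t.toList.headD 'A').isLower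

-- bind(s, k, v): replace the first pair keyed k, else append
def bindB : List (String × String) → String → String → List (String × String)
  | [], k, v => [(k, v)]
  | (k2, v2) :: rest, k, v =>
    if k2 == k then (k, v) :: rest else (k2, v2) :: bindB rest k v

-- unify_args: fused recursion over both argument lists at once
def unifyArgsB : List String → List String → List (String × String) →
    Option (List (String × String))
  | x :: xs, y :: ys, s =>
    let a := lookupB s x
    let b := lookupB s y
    if a == b then unifyArgsB xs ys s
    else if varB a then unifyArgsB xs ys (bindB s a b)
    else if varB b then unifyArgsB xs ys (bindB s b a)
    else none
  | _, _, s => some s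

-- solve(ps, s): scan all facts, guard on predicate and arity, recurse; dict(s) at the leaf
def solveB (facts : List (String × List String)) :
    List (String × List String) → List (String × String) → List (List (String × String))
  | [], s => [(PySem.Dict.ofList s).items]
  | (name, args) :: rest, s =>
    facts.flatMap fun f =>
      if f.1 == name && f.2.length == args.length then
        match unifyArgsB args f.2 s with
        | some s2 => solveB facts rest s2
        | none => []
      else []

def match_premises_to_facts_alt (premises : List (String × List String))
    (facts : List (String × List String)) : List (List (String × String)) :=
  solveB facts premises []

-- ===== PRECONDITION & SPEC =====
def Spec_match_premises_to_facts (premises : List (String × List String)) (facts : List (String × List String)) (out : List (List (String × String))) : Prop := out = match_premises_to_facts_alt premises facts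
instance (premises : List (String × List String)) (facts : List (String × List String)) (out : List (List (String × String))) : Decidable (Spec_match_premises_to_facts premises facts out) := by unfold Spec_match_premises_to_facts; infer_instance

-- ===== CLAIM (what is proved, stated in full; the proofs are below) =====
def Claim_equal_match_premises_to_facts : Prop := ∀ (premises : List (String × List String)) (facts : List (String × List String)), Dom_match_premises_to_facts premises facts → Spec_match_premises_to_facts premises facts (match_premises_to_facts premises facts)

-- ===== LEMMAS AND PROOFS =====
-- the substitutions matching premise p against the indexed facts, in fact order
def matchesOf (fbp : PySem.Dict String (List (String × List String)))
    (p : String × List String) (s : PySem.Dict String String) : List (PySem.Dict String String) :=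
  (fbp.getD p.1 []).filterMap (fun f => unifyAtoms p f s)

theorem flatMap_optElim {α β γ : Type} (l : List α) (u : α → Option β) (g : β → List γ) :
    l.flatMap (fun x => (u x).elim [] g) = (l.filterMap u).flatMap g := by
  induction l with
  | nil => rfl
  | cons x xs ih =>
    rw [List.flatMap_cons, List.filterMap_cons]
    cases h : u x with
    | none => simp only [Option.elim_none, List.nil_append]; exact ih
    | some b => simp only [Option.elim_some, List.flatMap_cons]; rw [ih]

theorem flatMap_guard {α γ : Type} (l : List α) (c : α → Bool) (g : α → List γ) :
    l.flatMap (fun x => if c x then g x else []) = (l.filter c).flatMap g := by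
  induction l with
  | nil => rfl
  | cons x xs ih =>
    rw [List.flatMap_cons, List.filter_cons]
    cases h : c x <;> simp [ih]

theorem backtrackA_cons (fbp : PySem.Dict String (List (String × List String)))
    (p : String × List String) (rest : List (String × List String))
    (s : PySem.Dict String String) :
    backtrackA fbp (p :: rest) s = (matchesOf fbp p s).flatMap (backtrackA fbp rest) := by
  have hbody : (fun (acc : List (PySem.Dict String String)) f =>
      match unifyAtoms p f s with
      | some s' => acc ++ backtrackA fbp rest s'
      | none => acc)
      = (fun acc f => acc ++ (unifyAtoms p f s).elim [] (backtrackA fbp rest)) := by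
    funext acc f
    cases h : unifyAtoms p f s <;> simp [Option.elim]
  rw [backtrackA, hbody, PySem.List.foldl_append_eq_flatMap, matchesOf, flatMap_optElim]
  simp

-- the index groups by predicate: looking a predicate up is filtering the fact list
theorem foldl_group_getD (facts : List (String × List String))
    (d : PySem.Dict String (List (String × List String))) (k : String) :
    ((facts.foldl (fun d f => d.insert f.1 (d.getD f.1 [] ++ [f])) d).getD k [])
      = d.getD k [] ++ facts.filter (fun f => f.1 == k) := by
  induction facts generalizing d with
  | nil => simp
  | cons f fs ih =>
    rw [List.foldl_cons, ih, List.filter_cons]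
    by_cases hk : f.1 = k
    · simp [PySem.Dict.getD_insert, hk]
    · have : (f.1 == k) = false := by simpa using hk
      simp [PySem.Dict.getD_insert, Ne.symm hk, this]

theorem getD_factsByPred (facts : List (String × List String)) (k : String) :
    (factsByPred facts).getD k [] = facts.filter (fun f => f.1 == k) := by
  rw [factsByPred, foldl_group_getD]
  simp

-- bindB on a nodup association list is Dict.insert
theorem bindB_eq_insert (l : List (String × String)) (k v : String)
    (h : (l.map Prod.fst).Nodup) :
    bindB l k v = ((PySem.Dict.mk l).insert k v).items := by
  induction l with
  | nil => simp [bindB, PySem.Dict.insert, PySem.Dict.contains]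
  | cons p rest ih =>
    obtain ⟨k2, v2⟩ := p
    simp only [List.map_cons, List.nodup_cons, List.mem_map] at h
    by_cases hk : k2 = k
    · have hb : (k2 == k) = true := by simpa using hk
      have hrest : ∀ q ∈ rest, (q.1 == k) = false := by
        intro q hq
        simp only [beq_eq_false_iff_ne, ne_eq]
        intro hq1
        exact h.1 ⟨q, hq, by rw [hq1, hk]⟩
      simp only [bindB, hb, if_true, PySem.Dict.insert, PySem.Dict.contains,
        List.any_cons, hb, Bool.true_or, if_true, List.map_cons, hb]
      refine congrArg (List.cons (k, v)) ?_
      symm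
      calc List.map (fun p => if (p.1 == k) = true then (k, v) else p) rest
          = List.map id rest := List.map_congr_left (fun q hq => by simp [hrest q hq])
        _ = rest := List.map_id rest
    · have hb : (k2 == k) = false := by simpa using hk
      simp only [bindB, hb, Bool.false_eq_true, if_false, ih h.2,
        PySem.Dict.insert, PySem.Dict.contains, List.any_cons, hb, Bool.false_or]
      cases hc : rest.any (fun p => p.1 == k) <;> simp [hb, hk]

-- lookupB is Dict.getD with the term itself as default
theorem lookupB_eq_getD (l : List (String × String)) (t : String) :
    lookupB l t = (PySem.Dict.mk l).getD t t := by
  induction l with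
  | nil => simp [lookupB, PySem.Dict.getD, PySem.Dict.get?]
  | cons p rest ih =>
    obtain ⟨k, v⟩ := p
    simp only [lookupB, PySem.Dict.getD, PySem.Dict.get?, List.find?_cons] at *
    cases hk : (k == t) <;> simp [hk, ih]

theorem varB_eq_pyIsVar (t : String) : varB t = pyIsVar t := by
  unfold varB pyIsVar
  cases t.toList <;> simp

-- fused unify_args equals the zip loop of A, and preserves key-nodup
theorem unifyArgsB_corr (xs ys : List String) (d : PySem.Dict String String)
    (h : (d.items.map Prod.fst).Nodup) :
    unifyArgsB xs ys d.items = (unifyLoop (xs.zip ys) d).map PySem.Dict.items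
    ∧ ∀ d', unifyLoop (xs.zip ys) d = some d' → (d'.items.map Prod.fst).Nodup := by
  induction xs generalizing ys d with
  | nil =>
    cases ys <;>
      exact ⟨rfl, fun d' hd' => by cases hd'; exact h⟩
  | cons x xs ih =>
    cases ys with
    | nil => exact ⟨rfl, fun d' hd' => by cases hd'; exact h⟩
    | cons y ys =>
      have hmk : PySem.Dict.mk d.items = d := rfl
      have hx : lookupB d.items x = applySubstTerm x d := by
        rw [lookupB_eq_getD, hmk]; rfl
      have hy : lookupB d.items y = applySubstTerm y d := by
        rw [lookupB_eq_getD, hmk]; rfl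
      have hins : ∀ a b : String, (((d.insert a b).items.map Prod.fst).Nodup) := by
        intro a b
        have := PySem.Dict.nodup_keys_insert d a b (by simpa [PySem.Dict.keys] using h)
        simpa [PySem.Dict.keys] using this
      simp only [List.zip_cons_cons, unifyArgsB, unifyLoop, unifyTerms, hx, hy,
        varB_eq_pyIsVar]
      by_cases he : applySubstTerm x d == applySubstTerm y d
      · simp only [he, if_true]
        exact ih ys d h
      · simp only [he, Bool.false_eq_true, if_false]
        by_cases hv1 : pyIsVar (applySubstTerm x d)
        · simp only [hv1, if_true]
          rw [bindB_eq_insert _ _ _ h, hmk]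
          exact ih ys _ (hins _ _)
        · simp only [hv1, Bool.false_eq_true, if_false]
          by_cases hv2 : pyIsVar (applySubstTerm y d)
          · simp only [hv2, if_true]
            rw [bindB_eq_insert _ _ _ h, hmk]
            exact ih ys _ (hins _ _)
          · simp [hv2]

-- ofList is the identity (as items) on a nodup association list
theorem items_ofList_nodup (l : List (String × String))
    (h : (l.map Prod.fst).Nodup) :
    (PySem.Dict.ofList l).items = l := by
  have aux : ∀ (l : List (String × String)) (d : PySem.Dict String String),
      (∀ p ∈ l, d.contains p.1 = false) → (l.map Prod.fst).Nodup →
      (l.foldl (fun acc p => acc.insert p.1 p.2) d).items = d.items ++ l := by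
    intro l
    induction l with
    | nil => intro d _ _; simp
    | cons p rest ih =>
      intro d hdisj hnd
      obtain ⟨k, v⟩ := p
      simp only [List.map_cons, List.nodup_cons, List.mem_map] at hnd
      have hc : d.contains k = false := hdisj (k, v) (List.mem_cons_self ..)
      have hins : (d.insert k v).items = d.items ++ [(k, v)] := by
        simp [PySem.Dict.insert, hc]
      rw [List.foldl_cons, ih]
      · rw [hins, List.append_assoc]; rfl
      · intro q hq
        simp only [PySem.Dict.contains, hins, List.any_append, List.any_cons,
          List.any_nil, Bool.or_false, Bool.or_eq_false_iff]
        refine ⟨by simpa [PySem.Dict.contains] using hdisj q (List.mem_cons_of_mem _ hq), ?_⟩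
        simp only [beq_eq_false_iff_ne, ne_eq]
        intro hq1
        exact hnd.1 ⟨q, hq, hq1.symm⟩
      · exact hnd.2
  have := aux l PySem.Dict.empty (by intro p _; rfl) h
  simpa [PySem.Dict.ofList, PySem.Dict.update, PySem.Dict.empty] using this

-- the main correspondence: B's solve equals A's backtrack, itemised
theorem solveB_eq_backtrackA (facts : List (String × List String))
    (ps : List (String × List String)) (d : PySem.Dict String String)
    (h : (d.items.map Prod.fst).Nodup) :
    solveB facts ps d.items = (backtrackA (factsByPred facts) ps d).map (·.items) := by
  induction ps generalizing d with
  | nil => simp [solveB, backtrackA, items_ofList_nodup d.items h]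
  | cons p rest ih =>
    obtain ⟨name, args⟩ := p
    rw [backtrackA_cons, List.map_flatMap]
    rw [matchesOf, getD_factsByPred]
    have step : ∀ f : String × List String,
        (if f.1 == name && f.2.length == args.length then
            match unifyArgsB args f.2 d.items with
            | some s2 => solveB facts rest s2
            | none => []
          else [])
        = (if f.1 == name then
            (unifyAtoms (name, args) f d).elim []
              (fun d' => (backtrackA (factsByPred facts) rest d').map (·.items))
          else []) := by
      intro f
      by_cases hp : f.1 = name
      · have hb : (f.1 == name) = true := by simpa using hp
        have hb' : ((name, args).1 != f.1) = false := by simp [hp]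
        by_cases hl : f.2.length = args.length
        · have hcorr := unifyArgsB_corr args f.2 d h
          have hatom : unifyAtoms (name, args) f d = unifyLoop (args.zip f.2) d := by
            simp [unifyAtoms, hb', hl]
          have hlb : (f.2.length == args.length) = true := by simpa using hl
          simp only [hb, hlb, Bool.and_self, if_true, hatom]
          rw [hcorr.1]
          cases hu : unifyLoop (args.zip f.2) d with
          | none => simp
          | some d' =>
            simp only [Option.map_some, Option.elim_some]
            exact ih d' (hcorr.2 d' hu)
        · have hlb : (f.2.length == args.length) = false := by simpa using hl
          have hatom : unifyAtoms (name, args) f d = none := by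
            simp only [unifyAtoms]
            rw [if_pos]
            simp only [hb', Bool.false_or, bne_iff_ne, ne_eq]
            exact fun hc => hl hc.symm
          simp [hb, hlb, hatom]
      · have hb : (f.1 == name) = false := by simpa using hp
        simp [hb]
    rw [solveB]
    simp only [step]
    rw [flatMap_guard, flatMap_optElim]

-- ===== VERDICT (by name: the statement is the Claim_ definition above) =====
theorem match_premises_to_facts_spec : Claim_equal_match_premises_to_facts := by
  intro premises facts _
  unfold Spec_match_premises_to_facts match_premises_to_facts match_premises_to_facts_alt
  have h := solveB_eq_backtrackA facts premises PySem.Dict.empty (by simp [PySem.Dict.empty])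
  simpa [PySem.Dict.empty] using h.symm
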